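-- pv_equiv track=rewrite | github.com/xuefei1/RWG_DV-Seq2Seq | utils/lang_utils.py | build_w2c_from_seg_word_lists
-- ===== SOURCE A (Python) =====
-- def build_w2c_from_seg_word_lists(seg_word_lists, limit=None):
--     w2c = {}
--     for seg_list in seg_word_lists:
--         for word in seg_list:
--             if len(word) == 0: continue
--             if word not in w2c: w2c[word] = 0
--             w2c[word] += 1
--     if limit is not None and len(w2c) > limit:
--         tmp = sorted([(w,c) for w,c in w2c.items()],key=lambda t:t[1],reverse=True)[:limit]
--         w2c = {t[0]:t[1] for t in tmp}
--     return w2c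
-- ===== SOURCE B (Python) =====
-- def build_w2c_from_seg_word_lists(seg_word_lists, limit=None):
--     w2c = {}
--     for seg_list in seg_word_lists:
--         for word in seg_list:
--             if word:
--                 w2c[word] = w2c.get(word, 0) + 1
--     if limit is None or len(w2c) <= limit:
--         return w2c
--     buckets = {}
--     for w, c in w2c.items():
--         buckets.setdefault(c, []).append(w)
--     out = {}
--     for c in sorted(buckets, reverse=True):
--         if len(out) >= limit:
--             break
--         for w in buckets[c]:
--             if len(out) >= limit:
--                 break
--             out[w] = c
--     return out
-- ===== Notes on version B (the rewrite author's own statement) =====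
-- stated objective: alternative
-- what changed: The trim step no longer sorts all items: B groups words into buckets keyed by count and walks the distinct counts in decreasing order, emitting bucket contents (insertion order preserves the stable-sort tie order) until limit words are taken; counting uses dict.get instead of a membership test plus two writes.
-- outside the precondition, e.g. on build_w2c_from_seg_word_lists([['a', 'b']], -1): A returns {'a': 1}, B returns {}
import Mathlib
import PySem

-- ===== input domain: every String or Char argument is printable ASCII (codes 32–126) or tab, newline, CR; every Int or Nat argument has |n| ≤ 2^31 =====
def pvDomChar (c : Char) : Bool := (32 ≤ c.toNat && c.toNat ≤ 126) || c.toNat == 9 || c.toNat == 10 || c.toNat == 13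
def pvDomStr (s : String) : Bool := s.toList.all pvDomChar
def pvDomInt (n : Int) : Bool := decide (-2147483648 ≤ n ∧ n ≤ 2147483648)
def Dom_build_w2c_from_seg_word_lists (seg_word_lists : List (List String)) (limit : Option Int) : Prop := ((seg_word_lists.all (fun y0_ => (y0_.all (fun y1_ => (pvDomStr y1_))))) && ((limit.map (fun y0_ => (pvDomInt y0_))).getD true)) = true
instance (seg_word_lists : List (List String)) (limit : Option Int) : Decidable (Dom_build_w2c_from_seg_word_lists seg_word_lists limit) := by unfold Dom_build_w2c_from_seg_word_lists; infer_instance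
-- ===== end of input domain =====

-- B replaces the full stable sort of all word/count items by a bucket-grouping of the
-- words by count walked in decreasing count order (alternative algorithm, same results).

-- ===== PORT A =====
def build_w2c_from_seg_word_lists (seg_word_lists : List (List String)) (limit : Option Int) : List (String × Int) :=
  let w2c : PySem.Dict String Int :=
    seg_word_lists.foldl (fun w2c seg_list =>
      seg_list.foldl (fun w2c word =>
        if PySem.Str.len word = 0 then w2c
        else
          let w2c := if w2c.contains word then w2c else w2c.insert word 0
          w2c.insert word (w2c.getD word 0 + 1)) w2c) PySem.Dict.empty
  match limit with
  | none => w2c.items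
  | some l =>
      if l < (w2c.size : Int) then
        let tmp := PySem.List.slice
          (PySem.List.sorted (w2c.items.map (fun p => (p.1, p.2))) (fun t => t.2) true)
          none (some l)
        (tmp.foldl (fun d t => d.insert t.1 t.2) (PySem.Dict.empty : PySem.Dict String Int)).items
      else w2c.items

-- ===== PORT B =====
def build_w2c_from_seg_word_lists_alt (seg_word_lists : List (List String)) (limit : Option Int) : List (String × Int) :=
  let w2c : PySem.Dict String Int :=
    seg_word_lists.foldl (fun w2c seg_list =>
      seg_list.foldl (fun w2c word =>
        if word = "" then w2c
        else w2c.insert word (w2c.getD word 0 + 1)) w2c) PySem.Dict.empty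
  match limit with
  | none => w2c.items
  | some l =>
      if (w2c.size : Int) ≤ l then w2c.items
      else
        let buckets : PySem.Dict Int (List String) :=
          w2c.items.foldl (fun b p => b.modify p.2 [] (fun ws => ws ++ [p.1])) PySem.Dict.empty
        let out : PySem.Dict String Int :=
          (PySem.List.sorted buckets.keys (fun c => c) true).foldl (fun out c =>
            if l ≤ (out.size : Int) then out
            else (buckets.getD c []).foldl (fun out w =>
              if l ≤ (out.size : Int) then out else out.insert w c) out) PySem.Dict.empty
        out.items

-- ===== PRECONDITION & SPEC =====
-- Pre_ restricts `limit` to the natural domain None / non-negative: on a negative limit A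
-- returns the accidental value of the slice sorted_items[:negative] (all but the last
-- |limit| items), while B's selection naturally keeps no word at all there.
def Pre_build_w2c_from_seg_word_lists (seg_word_lists : List (List String)) (limit : Option Int) : Prop :=
  (limit.all (fun l => decide (0 ≤ l))) = true
instance (seg_word_lists : List (List String)) (limit : Option Int) : Decidable (Pre_build_w2c_from_seg_word_lists seg_word_lists limit) := by unfold Pre_build_w2c_from_seg_word_lists; infer_instance

def pvWitness_build_w2c_from_seg_word_lists : List (List String) × Option Int :=
  ([["a", "b", "a"], ["b", "c", ""]], some 2)

def Spec_build_w2c_from_seg_word_lists (seg_word_lists : List (List String)) (limit : Option Int) (out : List (String × Int)) : Prop := out = build_w2c_from_seg_word_lists_alt seg_word_lists limit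
instance (seg_word_lists : List (List String)) (limit : Option Int) (out : List (String × Int)) : Decidable (Spec_build_w2c_from_seg_word_lists seg_word_lists limit out) := by unfold Spec_build_w2c_from_seg_word_lists; infer_instance

-- ===== CLAIM (what is proved, stated in full; the proofs are below) =====
def Claim_equal_build_w2c_from_seg_word_lists : Prop := ∀ (seg_word_lists : List (List String)) (limit : Option Int), Dom_build_w2c_from_seg_word_lists seg_word_lists limit → Pre_build_w2c_from_seg_word_lists seg_word_lists limit → Spec_build_w2c_from_seg_word_lists seg_word_lists limit (build_w2c_from_seg_word_lists seg_word_lists limit)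

-- ===== LEMMAS AND PROOFS =====

-- The two counting loop bodies agree on every dictionary and word.
lemma count_step_eq (d : PySem.Dict String Int) (w : String) :
    (if PySem.Str.len w = 0 then d
     else
       let d' := if d.contains w then d else d.insert w 0
       d'.insert w (d'.getD w 0 + 1))
    = (if w = "" then d else d.insert w (d.getD w 0 + 1)) := by
  by_cases hw : w = ""
  · subst hw; simp [PySem.Str.len]
  · have hlen : ¬ PySem.Str.len w = 0 := by
      simp [PySem.Str.len_eq]
      intro h
      exact hw (by cases w; simp_all)
    simp only [if_neg hlen, if_neg hw]
    by_cases hc : d.contains w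
    · simp [hc]
    · simp only [Bool.not_eq_true] at hc
      rw [if_neg (by simp [hc]), PySem.Dict.insert_insert_self, PySem.Dict.getD_insert_self,
        PySem.Dict.getD_of_not_contains (h := hc)]

-- insertBy passes over a block none of whose elements trigger `before`.
lemma insertBy_append_left {α : Type} (before : α → α → Bool) (x : α) (ys zs : List α)
    (h : ∀ y ∈ ys, before x y = false) :
    PySem.List.insertBy before x (ys ++ zs) = ys ++ PySem.List.insertBy before x zs := by
  induction ys with
  | nil => simp
  | cons y ys ih =>
      simp only [List.cons_append, PySem.List.insertBy, h y (by simp)]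
      simp only [Bool.false_eq_true, if_false, List.cons.injEq, true_and]
      exact ih (fun y hy => h y (by simp [hy]))

-- insertBy puts x in front when every element triggers `before`.
lemma insertBy_of_forall_before {α : Type} (before : α → α → Bool) (x : α) (zs : List α)
    (h : ∀ z ∈ zs, before x z = true) :
    PySem.List.insertBy before x zs = x :: zs := by
  cases zs with
  | nil => rfl
  | cons z zs => simp [PySem.List.insertBy, h z (by simp)]

lemma flatMap_congr_mem {α β : Type} (l : List α) (f g : α → List β)
    (h : ∀ a ∈ l, f a = g a) : l.flatMap f = l.flatMap g := by
  simp only [List.flatMap]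
  rw [List.map_congr_left h]

lemma sorted_rev_append_singleton {α κ : Type} [LinearOrder κ] (xs : List α) (x : α) (key : α → κ) :
    PySem.List.sorted (xs ++ [x]) key true
      = PySem.List.insertBy (fun a b => decide (key b < key a)) x (PySem.List.sorted xs key true) := by
  rw [PySem.List.sorted_rev_eq_foldl_insertBy, PySem.List.sorted_rev_eq_foldl_insertBy,
    List.foldl_append]
  rfl

-- Inserting an element whose key is already present lands at the end of its key's group.
lemma insertBy_flatMap_mem {α : Type} (key : α → Int) (K : List Int) (g g' : Int → List α)
    (x : α) (c : Int) (hx : key x = c)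
    (hdesc : K.Pairwise (fun a b => b < a)) (hc : c ∈ K)
    (hg : ∀ k ∈ K, ∀ p ∈ g k, key p = k)
    (hg' : ∀ k ∈ K, g' k = if k = c then g k ++ [x] else g k) :
    PySem.List.insertBy (fun a b => decide (key b < key a)) x (K.flatMap g) = K.flatMap g' := by
  revert hdesc hc hg hg'
  induction K with
  | nil => intro _ hc _ _; cases hc
  | cons k K ih =>
    intro hdesc hc hg hg'
    rw [List.pairwise_cons] at hdesc
    obtain ⟨hk, hdesc'⟩ := hdesc
    by_cases hkc : k = c
    · have hcK : c ∉ K := fun hmem => by have := hk c hmem; omega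
      simp only [List.flatMap_cons]
      rw [insertBy_append_left _ _ _ _ (fun y hy => by
          have hky := hg k (by simp) y hy
          simp only [hky, hx, hkc, decide_eq_false_iff_not]
          omega),
        insertBy_of_forall_before _ _ _ (fun z hz => by
          obtain ⟨j, hj, hzj⟩ := List.mem_flatMap.mp hz
          have hkz := hg j (by simp [hj]) z hzj
          have hjk := hk j hj
          simp only [hkz, hx, decide_eq_true_eq]
          omega),
        hg' k (by simp), if_pos hkc,
        flatMap_congr_mem K g' g (fun a ha => by
          rw [hg' a (by simp [ha]), if_neg (by rintro rfl; exact hcK ha)])]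
      simp
    · have hcK : c ∈ K := by
        rcases List.mem_cons.mp hc with h | h
        · exact absurd h.symm hkc
        · exact h
      have hck : c < k := hk c hcK
      simp only [List.flatMap_cons]
      rw [insertBy_append_left _ _ _ _ (fun y hy => by
          have hky := hg k (by simp) y hy
          simp only [hky, hx, decide_eq_false_iff_not]
          omega),
        hg' k (by simp), if_neg hkc,
        ih hdesc' hcK (fun j hj p hp => hg j (by simp [hj]) p hp)
          (fun j hj => hg' j (by simp [hj]))]

-- Inserting an element with a fresh key creates a new singleton group at the key's sorted place.
lemma insertBy_flatMap_new {α : Type} (key : α → Int) (K : List Int) (g g' : Int → List α)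
    (x : α) (c : Int) (hx : key x = c)
    (hdesc : K.Pairwise (fun a b => b < a)) (hc : c ∉ K)
    (hg : ∀ k ∈ K, ∀ p ∈ g k, key p = k) (hgne : ∀ k ∈ K, g k ≠ [])
    (hg' : ∀ k ∈ K, g' k = g k) (hg'c : g' c = [x]) :
    PySem.List.insertBy (fun a b => decide (key b < key a)) x (K.flatMap g)
      = (PySem.List.insertBy (fun a b => decide (b < (a : Int))) c K).flatMap g' := by
  revert hdesc hc hg hgne hg'
  induction K with
  | nil =>
    intro _ _ _ _ _
    simp [PySem.List.insertBy, hg'c]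
  | cons k K ih =>
    intro hdesc hc hg hgne hg'
    rw [List.pairwise_cons] at hdesc
    obtain ⟨hk, hdesc'⟩ := hdesc
    have hkc : k ≠ c := fun e => hc (by rw [e]; exact List.mem_cons_self ..)
    by_cases hlt : k < c
    · have hins : PySem.List.insertBy (fun a b => decide (b < (a : Int))) c (k :: K) = c :: k :: K := by
        simp [PySem.List.insertBy, hlt]
      rw [insertBy_of_forall_before _ _ _ (fun z hz => by
          obtain ⟨j, hj, hzj⟩ := List.mem_flatMap.mp hz
          have hkz := hg j hj z hzj
          have hjk : j ≤ k := by
            rcases List.mem_cons.mp hj with h | h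
            · omega
            · exact le_of_lt (hk j h)
          simp only [hkz, hx, decide_eq_true_eq]
          omega),
        hins]
      simp only [List.flatMap_cons]
      rw [hg'c, hg' k (by simp),
        flatMap_congr_mem K g' g (fun a ha => hg' a (by simp [ha]))]
      simp
    · have hck : c < k := by omega
      have hins : PySem.List.insertBy (fun a b => decide (b < (a : Int))) c (k :: K)
          = k :: PySem.List.insertBy (fun a b => decide (b < (a : Int))) c K := by
        simp [PySem.List.insertBy, hlt]
      rw [hins]
      simp only [List.flatMap_cons]
      rw [insertBy_append_left _ _ _ _ (fun y hy => by
          have hky := hg k (by simp) y hy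
          simp only [hky, hx, decide_eq_false_iff_not]
          omega),
        hg' k (by simp)]
      congr 1
      exact ih hdesc' (fun h => hc (List.mem_cons_of_mem _ h))
        (fun j hj p hp => hg j (by simp [hj]) p hp)
        (fun j hj => hgne j (by simp [hj]))
        (fun j hj => hg' j (by simp [hj]))

-- Python's stable reverse sort by an Int key is the concatenation, over the distinct keys
-- in decreasing order, of the original-order groups of each key.
theorem sorted_rev_groups {α : Type} (key : α → Int) (l : List α) :
    PySem.List.sorted l key true
      = (PySem.List.sorted (PySem.List.dedup (l.map key)) (fun c => c) true).flatMap
          (fun c => l.filter (fun p => key p == c)) := by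
  induction l using List.reverseRecOn with
  | nil => rfl
  | append_singleton l x ih =>
    have hperm : (PySem.List.sorted (PySem.List.dedup (l.map key)) (fun c => c) true).Perm
        (PySem.List.dedup (l.map key)) := PySem.List.sorted_perm _ _ _
    have hnd : (PySem.List.sorted (PySem.List.dedup (l.map key)) (fun c => c) true).Nodup :=
      hperm.nodup_iff.mpr (PySem.List.nodup_dedup _)
    have hle : (PySem.List.sorted (PySem.List.dedup (l.map key)) (fun c => c) true).Pairwise
        (fun a b => b ≤ a) := PySem.List.sorted_pairwise_rev _ _
    have hdesc : (PySem.List.sorted (PySem.List.dedup (l.map key)) (fun c => c) true).Pairwise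
        (fun a b => b < a) :=
      (hle.and hnd).imp (fun h => lt_of_le_of_ne h.1 (Ne.symm h.2))
    have hmemK : ∀ k, k ∈ PySem.List.sorted (PySem.List.dedup (l.map key)) (fun c => c) true ↔
        k ∈ l.map key := by
      intro k
      rw [PySem.List.mem_sorted, PySem.List.mem_dedup]
    rw [sorted_rev_append_singleton, ih]
    by_cases hmem : key x ∈ l.map key
    · have hdd : PySem.List.dedup ((l ++ [x]).map key) = PySem.List.dedup (l.map key) := by
        simp only [List.map_append, List.map_cons, List.map_nil, PySem.List.dedup_eq_ofList,
          PySem.Set.ofList_append_singleton]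
        exact PySem.Set.add_of_mem ((PySem.Set.mem_ofList _ _).mpr hmem)
      rw [hdd]
      apply insertBy_flatMap_mem key _ _ _ x (key x) rfl hdesc ((hmemK _).mpr hmem)
      · intro k _ p hp
        simpa using (List.mem_filter.mp hp).2
      · intro k _
        by_cases hkc : k = key x
        · subst hkc
          rw [if_pos rfl, List.filter_append]
          simp
        · rw [if_neg hkc, List.filter_append]
          have : [x].filter (fun p => key p == k) = [] := by
            simp [Ne.symm hkc]
          rw [this, List.append_nil]
    · have hdd : PySem.List.dedup ((l ++ [x]).map key) = PySem.List.dedup (l.map key) ++ [key x] := by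
        simp only [List.map_append, List.map_cons, List.map_nil, PySem.List.dedup_eq_ofList,
          PySem.Set.ofList_append_singleton]
        exact PySem.Set.add_of_not_mem (fun h => hmem ((PySem.Set.mem_ofList _ _).mp h))
      rw [hdd, sorted_rev_append_singleton (key := fun c => c)]
      apply insertBy_flatMap_new key _ _ _ x (key x) rfl hdesc
        (fun h => hmem ((hmemK _).mp h))
      · intro k _ p hp
        simpa using (List.mem_filter.mp hp).2
      · intro k hkK
        obtain ⟨p, hpl, hpk⟩ := List.mem_map.mp ((hmemK k).mp hkK)
        exact List.ne_nil_of_mem (List.mem_filter.mpr ⟨hpl, by simp [hpk]⟩)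
      · intro k hkK
        have hkc : k ≠ key x := fun e => hmem (e ▸ (hmemK k).mp hkK)
        rw [List.filter_append]
        have : [x].filter (fun p => key p == k) = [] := by
          simp [Ne.symm hkc]
        rw [this, List.append_nil]
      · rw [List.filter_append]
        have h1 : l.filter (fun p => key p == key x) = [] := by
          rw [List.filter_eq_nil_iff]
          intro p hp
          simp only [beq_iff_eq]
          exact fun e => hmem (List.mem_map.mpr ⟨p, hp, e⟩)
        rw [h1, List.nil_append]
        simp

-- Once the size guard holds, the guarded insert loop is stuck.
lemma guarded_fold_stuck (l : Int) (L : List (String × Int)) (d : PySem.Dict String Int)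
    (h : l ≤ (d.size : Int)) :
    L.foldl (fun out p => if l ≤ (out.size : Int) then out else out.insert p.1 p.2) d = d := by
  induction L with
  | nil => rfl
  | cons p L ih => simp only [List.foldl_cons, if_pos h]; exact ih

-- The guarded fresh-key insert loop appends exactly the first (l - size) pairs.
lemma guarded_insert_loop (l : Int) (L : List (String × Int)) (d : PySem.Dict String Int)
    (hfresh : ∀ p ∈ L, d.contains p.1 = false) (hnd : (L.map (fun p => p.1)).Nodup)
    (hknd : d.keys.Nodup) :
    (L.foldl (fun out p => if l ≤ (out.size : Int) then out else out.insert p.1 p.2) d).items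
      = d.items ++ L.take (l.toNat - d.size) := by
  revert hfresh hknd hnd
  induction L generalizing d with
  | nil => intro _ _ _; simp
  | cons p L ih =>
    intro hfresh hnd hknd
    rw [List.map_cons, List.nodup_cons] at hnd
    obtain ⟨hp1, hndL⟩ := hnd
    by_cases hl : l ≤ (d.size : Int)
    · rw [List.foldl_cons, if_pos hl, guarded_fold_stuck _ _ _ hl]
      have h0 : l.toNat - d.size = 0 := by omega
      rw [h0]
      simp
    · have hfp : d.contains p.1 = false := hfresh p (by simp)
      have hitems : (d.insert p.1 p.2).items = d.items ++ [p] := by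
        rw [PySem.Dict.items_insert_of_not_contains (h := hfp)]
      have hsize : (d.insert p.1 p.2).size = d.size + 1 := by
        simp only [PySem.Dict.size, hitems, List.length_append, List.length_cons, List.length_nil]
      have hfresh' : ∀ q ∈ L, (d.insert p.1 p.2).contains q.1 = false := by
        intro q hq
        rw [PySem.Dict.contains_insert]
        have hne : q.1 ≠ p.1 := by
          intro e
          exact hp1 (e ▸ List.mem_map.mpr ⟨q, hq, rfl⟩)
        simp [hne, hfresh q (by simp [hq])]
      have hknd' : (d.insert p.1 p.2).keys.Nodup := PySem.Dict.nodup_keys_insert _ _ _ hknd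
      rw [List.foldl_cons, if_neg hl, ih (d.insert p.1 p.2) hfresh' hndL hknd', hitems, hsize]
      have hn : l.toNat - d.size = (l.toNat - (d.size + 1)) + 1 := by omega
      rw [hn, List.take_succ_cons]
      simp

-- The counting loop keeps the word keys distinct.
lemma nodup_keys_count (sw : List (List String)) :
    (sw.foldl (fun w2c seg_list =>
      seg_list.foldl (fun w2c word =>
        if word = "" then w2c
        else w2c.insert word (w2c.getD word 0 + 1)) w2c) (PySem.Dict.empty : PySem.Dict String Int)).keys.Nodup := by
  have hstep : ∀ (seg : List String) (d : PySem.Dict String Int), d.keys.Nodup →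
      (seg.foldl (fun w2c word => if word = "" then w2c
        else w2c.insert word (w2c.getD word 0 + 1)) d).keys.Nodup := by
    intro seg
    induction seg with
    | nil => intro d h; exact h
    | cons w seg ih =>
      intro d h
      rw [List.foldl_cons]
      by_cases hw : w = ""
      · rw [if_pos hw]; exact ih d h
      · rw [if_neg hw]; exact ih _ (PySem.Dict.nodup_keys_insert _ _ _ h)
  have : ∀ (sw : List (List String)) (d : PySem.Dict String Int), d.keys.Nodup →
      (sw.foldl (fun w2c seg_list => seg_list.foldl (fun w2c word => if word = "" then w2c
        else w2c.insert word (w2c.getD word 0 + 1)) w2c) d).keys.Nodup := by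
    intro sw
    induction sw with
    | nil => intro d h; exact h
    | cons seg sw ih =>
      intro d h
      rw [List.foldl_cons]
      exact ih _ (hstep seg d h)
  exact this sw _ PySem.Dict.nodup_keys_empty

-- ===== VERDICT (by name: the statement is the Claim_ definition above) =====
theorem build_w2c_from_seg_word_lists_spec : Claim_equal_build_w2c_from_seg_word_lists := by
  intro sw limit hdom hpre
  unfold Spec_build_w2c_from_seg_word_lists
  unfold build_w2c_from_seg_word_lists build_w2c_from_seg_word_lists_alt
  have hcount : (sw.foldl (fun w2c seg_list => seg_list.foldl (fun w2c word =>
        if PySem.Str.len word = 0 then w2c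
        else
          let w2c := if w2c.contains word then w2c else w2c.insert word 0
          w2c.insert word (w2c.getD word 0 + 1)) w2c)
          (PySem.Dict.empty : PySem.Dict String Int))
      = (sw.foldl (fun w2c seg_list => seg_list.foldl (fun w2c word =>
        if word = "" then w2c else w2c.insert word (w2c.getD word 0 + 1)) w2c)
          (PySem.Dict.empty : PySem.Dict String Int)) := by
    apply PySem.List.foldl_congr_mem
    intro acc seg _
    apply PySem.List.foldl_congr_mem
    intro d w _
    exact count_step_eq d w
  simp only [hcount]
  cases limit with
  | none => rfl
  | some l =>
    have hl0 : 0 ≤ l := by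
      unfold Pre_build_w2c_from_seg_word_lists at hpre
      simpa using hpre
    by_cases hsz : ((sw.foldl (fun w2c seg_list => seg_list.foldl (fun w2c word =>
        if word = "" then w2c else w2c.insert word (w2c.getD word 0 + 1)) w2c)
        (PySem.Dict.empty : PySem.Dict String Int)).size : Int) ≤ l
    · show (if l < _ then _ else _) = (if _ ≤ l then _ else _)
      rw [if_neg (by omega), if_pos hsz]
    · show (if l < _ then _ else _) = (if _ ≤ l then _ else _)
      rw [if_pos (by omega), if_neg hsz]
      set W : PySem.Dict String Int := (sw.foldl (fun w2c seg_list => seg_list.foldl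
        (fun w2c word => if word = "" then w2c else w2c.insert word (w2c.getD word 0 + 1)) w2c)
        (PySem.Dict.empty : PySem.Dict String Int)) with hWdef
      have hknd : W.keys.Nodup := nodup_keys_count sw
      have hndI : (W.items.map (fun p => p.1)).Nodup := by
        simpa only [PySem.Dict.keys] using hknd
      have hSperm : (PySem.List.sorted W.items (fun t => t.2) true).Perm W.items :=
        PySem.List.sorted_perm _ _ _
      have hSnd : ((PySem.List.sorted W.items (fun t => t.2) true).map (fun p => p.1)).Nodup :=
        ((hSperm.map (fun p => p.1)).nodup_iff).mpr hndI
      have htknd : (((PySem.List.sorted W.items (fun t => t.2) true).take l.toNat).map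
          (fun p => p.1)).Nodup := by
        rw [List.map_take]
        exact hSnd.sublist (List.take_sublist _ _)
      have hmapeta : W.items.map (fun p : String × Int => (p.1, p.2)) = W.items := by
        simp
      rw [hmapeta, PySem.List.slice_to _ hl0,
        PySem.Dict.items_foldl_insert_fresh _ (fun t : String × Int => t.1)
          (fun t : String × Int => t.2) _
          (fun a _ => PySem.Dict.contains_empty _) htknd]
      -- B side
      have hbk : (W.items.foldl (fun b p => b.modify p.2 [] (fun ws => ws ++ [p.1]))
          (PySem.Dict.empty : PySem.Dict Int (List String))).keys
          = PySem.List.dedup (W.items.map (fun p => p.2)) := by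
        rw [PySem.Dict.keys_foldl_modify_key (key := fun p : String × Int => p.2)]
        simp [PySem.Dict.keys_empty, PySem.Set.update_nil_left]
      have hbg : ∀ c : Int, (W.items.foldl (fun b p => b.modify p.2 [] (fun ws => ws ++ [p.1]))
          (PySem.Dict.empty : PySem.Dict Int (List String))).getD c []
          = (W.items.filter (fun p => p.2 == c)).map (fun p => p.1) := by
        intro c
        have h1 : W.items.foldl (fun b p => b.modify p.2 [] (fun ws => ws ++ [p.1]))
            (PySem.Dict.empty : PySem.Dict Int (List String))
            = (W.items.map (fun p => (p.2, p.1))).foldl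
                (fun b q => b.modify q.1 [] (fun ws => ws ++ [q.2])) PySem.Dict.empty := by
          rw [List.foldl_map]
        rw [h1, PySem.Dict.getD_foldl_modify_append]
        simp [List.filter_map, List.map_map, Function.comp_def]
      rw [hbk]
      have houter : ∀ (acc : PySem.Dict String Int) (c : Int),
          c ∈ PySem.List.sorted (PySem.List.dedup (W.items.map (fun p => p.2))) (fun c => c) true →
          (if l ≤ (acc.size : Int) then acc
           else ((W.items.foldl (fun b p => b.modify p.2 [] (fun ws => ws ++ [p.1]))
              (PySem.Dict.empty : PySem.Dict Int (List String))).getD c []).foldl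
              (fun out w => if l ≤ (out.size : Int) then out else out.insert w c) acc)
          = (W.items.filter (fun p => p.2 == c)).foldl
              (fun out p => if l ≤ (out.size : Int) then out else out.insert p.1 p.2) acc := by
        intro acc c _
        by_cases hguard : l ≤ (acc.size : Int)
        · rw [if_pos hguard, guarded_fold_stuck _ _ _ hguard]
        · rw [if_neg hguard, hbg c, List.foldl_map]
          apply PySem.List.foldl_congr_mem
          intro out p hp
          have hp2 : p.2 = c := by simpa using (List.mem_filter.mp hp).2
          rw [hp2]
      rw [PySem.List.foldl_congr_mem _ _ _ _ houter, ← List.foldl_flatMap]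
      have hgrp := sorted_rev_groups (fun p : String × Int => p.2) W.items
      beta_reduce at hgrp
      rw [← hgrp,
        guarded_insert_loop l _ _ (fun p _ => PySem.Dict.contains_empty _) hSnd
          PySem.Dict.nodup_keys_empty]
      simp
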